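-- pv_equiv track=rewrite | github.com/ssongjj/studycodingtest | 프로그래머스/2/340212. ［PCCP 기출문제］ 2번 ／ 퍼즐 게임 챌린지/［PCCP 기출문제］ 2번 ／ 퍼즐 게임 챌린지.py | cal_time
-- ===== SOURCE A (Python) =====
-- def cal_time(diffs, times, level): # 걸리는 시간
--     total = 0
--     n = len(diffs)
--
--     for i in range(n):
--         diff = diffs[i]
--         time_cur = times[i]
--
--         if diff <= level:
--             total += time_cur
--         else:
--             time_prev = times[i - 1] if i > 0 else 0
--             total += (diff - level) * (time_cur + time_prev) + time_cur
--     return total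
-- ===== SOURCE B (Python) =====
-- def cal_time(diffs, times, level):
--     # weight formulation: times[i] is paid once, plus once per retry of puzzle i
--     # and once per retry of puzzle i+1 (retry count r = max(diff - level, 0))
--     retries = [max(d - level, 0) for d in diffs]
--     nxt = retries[1:] + [0]
--     return sum(t * (1 + r + rn) for t, r, rn in zip(times, retries, nxt))
-- ===== Notes on version B (the rewrite author's own statement) =====
-- stated objective: alternative
-- what changed: Recasts the total as a weighted sum: builds the retry-count vector max(diffs[i]-level,0), zips it with its own one-step shift, and sums times[i]*(1+retries[i]+retries[i+1]), eliminating A's per-element branch and previous-time lookback.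
import Mathlib
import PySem

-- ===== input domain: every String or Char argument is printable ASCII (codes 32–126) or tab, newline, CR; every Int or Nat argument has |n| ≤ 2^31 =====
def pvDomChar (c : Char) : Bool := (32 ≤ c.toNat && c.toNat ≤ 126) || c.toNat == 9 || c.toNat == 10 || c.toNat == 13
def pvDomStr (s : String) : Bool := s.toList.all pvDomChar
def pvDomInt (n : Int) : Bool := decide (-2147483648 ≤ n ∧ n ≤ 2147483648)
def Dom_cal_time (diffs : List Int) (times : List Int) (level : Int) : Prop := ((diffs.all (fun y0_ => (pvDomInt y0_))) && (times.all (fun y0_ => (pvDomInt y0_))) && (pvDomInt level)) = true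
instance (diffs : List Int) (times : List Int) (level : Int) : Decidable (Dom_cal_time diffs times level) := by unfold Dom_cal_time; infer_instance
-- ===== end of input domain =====

-- B recasts the total as a weighted sum: each times[i] multiplied by 1 + retries[i] + retries[i+1],
-- built from the retry-count vector and its shift (alternative formulation, same cost).

-- ===== PORT A =====
def cal_time (diffs : List Int) (times : List Int) (level : Int) : Int :=
  let n : Int := PySem.List.len diffs
  (PySem.List.pyRange 0 n 1).foldl (fun total i =>
    let diff := PySem.List.pyGetD diffs i 0
    let time_cur := PySem.List.pyGetD times i 0
    if diff ≤ level then total + time_cur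
    else
      let time_prev := if i > 0 then PySem.List.pyGetD times (i - 1) 0 else 0
      total + ((diff - level) * (time_cur + time_prev) + time_cur)) 0

-- ===== PORT B =====
def cal_time_alt (diffs : List Int) (times : List Int) (level : Int) : Int :=
  let retries := diffs.map (fun d => max (d - level) 0)
  let nxt := PySem.List.slice retries (some 1) none ++ [0]
  ((times.zip (retries.zip nxt)).map (fun p => p.1 * (1 + p.2.1 + p.2.2))).sum

-- ===== PRECONDITION & SPEC =====
-- Pre_ excludes exactly the inputs where times is shorter than diffs: there A raises IndexError on times[i].
def Pre_cal_time (diffs : List Int) (times : List Int) (level : Int) : Prop :=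
  diffs.length ≤ times.length
instance (diffs : List Int) (times : List Int) (level : Int) : Decidable (Pre_cal_time diffs times level) := by unfold Pre_cal_time; infer_instance
def pvWitness_cal_time : List Int × List Int × Int := ([3, 1, 5], [4, 2, 6], 2)


def Spec_cal_time (diffs : List Int) (times : List Int) (level : Int) (out : Int) : Prop := out = cal_time_alt diffs times level
instance (diffs : List Int) (times : List Int) (level : Int) (out : Int) : Decidable (Spec_cal_time diffs times level out) := by unfold Spec_cal_time; infer_instance

-- ===== CLAIM (what is proved, stated in full; the proofs are below) =====
def Claim_equal_cal_time : Prop := ∀ (diffs : List Int) (times : List Int) (level : Int), Dom_cal_time diffs times level → Pre_cal_time diffs times level → Spec_cal_time diffs times level (cal_time diffs times level)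

-- ===== LEMMAS AND PROOFS =====

-- abbreviations used only by the proofs
def tF (times : List Int) (i : Nat) : Int := times.getD i 0
def rF (diffs : List Int) (level : Int) (i : Nat) : Int := max (diffs.getD i 0 - level) 0
def tpF (times : List Int) (i : Nat) : Int := if i = 0 then 0 else tF times (i - 1)
def rnF (diffs : List Int) (level : Int) (n i : Nat) : Int := if i + 1 < n then rF diffs level (i + 1) else 0

lemma foldl_range_sum (n : Nat) (f : Nat → Int) :
    (List.range n).foldl (fun a k => a + f k) 0 = ∑ i ∈ Finset.range n, f i := by
  induction n with
  | zero => simp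
  | succ m ih => rw [List.range_succ, List.foldl_append, Finset.sum_range_succ, ih]; simp

lemma cal_time_eq_sum (diffs times : List Int) (level : Int) :
    cal_time diffs times level
      = ∑ i ∈ Finset.range diffs.length,
          (tF times i + rF diffs level i * (tF times i + tpF times i)) := by
  simp only [cal_time]
  have hfun : (fun (total i : Int) =>
      if PySem.List.pyGetD diffs i 0 ≤ level then total + PySem.List.pyGetD times i 0
      else
        total + ((PySem.List.pyGetD diffs i 0 - level) *
          (PySem.List.pyGetD times i 0 + (if i > 0 then PySem.List.pyGetD times (i - 1) 0 else 0)) +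
          PySem.List.pyGetD times i 0))
      = fun total i => total +
          (PySem.List.pyGetD times i 0 +
            (max (PySem.List.pyGetD diffs i 0 - level) 0) *
              (PySem.List.pyGetD times i 0 + (if i > 0 then PySem.List.pyGetD times (i - 1) 0 else 0))) := by
    funext total i
    by_cases h : PySem.List.pyGetD diffs i 0 ≤ level
    · simp only [if_pos h, max_eq_right (by omega : PySem.List.pyGetD diffs i 0 - level ≤ 0)]
      ring
    · simp only [if_neg h, max_eq_left (by omega : (0:Int) ≤ PySem.List.pyGetD diffs i 0 - level)]
      ring
  simp only [hfun]
  rw [PySem.List.len_eq, PySem.List.pyRange_one, List.foldl_map, foldl_range_sum]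
  apply Finset.sum_congr rfl
  intro k _
  simp only [zero_add]
  cases k with
  | zero => simp [tF, rF, tpF, PySem.List.pyGetD_zero, List.getD]
  | succ m =>
    have h2 : ((m + 1 : Nat) : Int) - 1 = ((m : Nat) : Int) := by push_cast; ring
    have h3 : (0:Int) < ((m + 1 : Nat) : Int) := by positivity
    simp only [gt_iff_lt, h3, if_pos, h2, PySem.List.pyGetD_natCast]
    simp [tF, rF, tpF]

lemma cal_time_alt_eq_sum (diffs times : List Int) (level : Int)
    (hpre : diffs.length ≤ times.length) :
    cal_time_alt diffs times level
      = ∑ i ∈ Finset.range diffs.length,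
          tF times i * (1 + rF diffs level i + rnF diffs level diffs.length i) := by
  simp only [cal_time_alt]
  rw [PySem.List.slice_from_one]
  set n := diffs.length with hn
  have hlist :
      (times.zip ((diffs.map (fun d => max (d - level) 0)).zip
          ((diffs.map (fun d => max (d - level) 0)).tail ++ [0]))).map
        (fun p => p.1 * (1 + p.2.1 + p.2.2))
      = List.ofFn (fun i : Fin n =>
          tF times i * (1 + rF diffs level i + rnF diffs level n i)) := by
    apply List.ext_getElem
    · simp [List.length_zip, List.length_tail]
      omega
    · intro i h1 h2
      have hi : i < n := by simpa using h2
      have hit : i < times.length := by omega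
      have hid : i < diffs.length := hi
      simp only [List.getElem_map, List.getElem_zip, List.getElem_ofFn]
      have htf : times[i] = tF times i := (List.getD_eq_getElem times 0 hit).symm
      have hrf : max (diffs[i] - level) 0 = rF diffs level i := by
        simp [rF, List.getElem?_eq_getElem hid]
      have hnxt : ((diffs.map (fun d => max (d - level) 0)).tail ++ [0])[i]'(by
            simp [List.length_tail]; omega)
          = rnF diffs level n i := by
        by_cases hc : i + 1 < n
        · rw [List.getElem_append_left (by simp [List.length_tail]; omega)]
          rw [List.getElem_tail]
          simp [rnF, rF, if_pos hc,
            List.getElem?_eq_getElem (show i + 1 < diffs.length by omega)]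
        · have hlen : ((diffs.map (fun d => max (d - level) 0)).tail).length = i := by
            simp [List.length_tail]; omega
          rw [List.getElem_append_right (by omega)]
          simp [hlen, rnF, if_neg hc]
      rw [htf, hrf, hnxt]
  rw [hlist, List.sum_ofFn]
  exact Fin.sum_univ_eq_sum_range
    (fun i => tF times i * (1 + rF diffs level i + rnF diffs level n i)) n

lemma shift_sum (diffs times : List Int) (level : Int) (n : Nat) :
    ∑ i ∈ Finset.range n, rF diffs level i * tpF times i
      = ∑ i ∈ Finset.range n, tF times i * rnF diffs level n i := by
  cases n with
  | zero => simp
  | succ m =>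
    rw [Finset.sum_range_succ' (fun i => rF diffs level i * tpF times i) m]
    rw [Finset.sum_range_succ (fun i => tF times i * rnF diffs level (m + 1) i) m]
    have h0 : rF diffs level 0 * tpF times 0 = 0 := by simp [tpF]
    have hm : tF times m * rnF diffs level (m + 1) m = 0 := by
      simp [rnF]
    rw [h0, hm, add_zero, add_zero]
    apply Finset.sum_congr rfl
    intro i hi
    have hi' : i < m := Finset.mem_range.mp hi
    simp only [tpF, rnF, if_neg (Nat.succ_ne_zero i), if_pos (by omega : i + 1 < m + 1),
      Nat.add_sub_cancel]
    ring

-- ===== VERDICT (by name: the statement is the Claim_ definition above) =====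
theorem cal_time_spec : Claim_equal_cal_time := by
  intro diffs times level _ hpre
  unfold Spec_cal_time
  rw [cal_time_eq_sum, cal_time_alt_eq_sum diffs times level hpre]
  have expand : ∀ i ∈ Finset.range diffs.length,
      tF times i + rF diffs level i * (tF times i + tpF times i)
        = (tF times i + tF times i * rF diffs level i) + rF diffs level i * tpF times i := by
    intro i _; ring
  rw [Finset.sum_congr rfl expand, Finset.sum_add_distrib, shift_sum]
  have expand2 : ∀ i ∈ Finset.range diffs.length,
      tF times i * (1 + rF diffs level i + rnF diffs level diffs.length i)
        = (tF times i + tF times i * rF diffs level i) + tF times i * rnF diffs level diffs.length i := by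
    intro i _; ring
  rw [Finset.sum_congr rfl expand2, Finset.sum_add_distrib, Finset.sum_add_distrib, Finset.sum_add_distrib]
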